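-- pv_equiv track=rewrite | github.com/khourye/remove_citations | process_text.py | remove_citations
-- ===== SOURCE A (Python) =====
-- def remove_citations(text):
--     char = 0
--     while char < len(text):
--         if text[char] == '[':
--             text = text[0:char] + text[char+3:]
--         else:
--             char += 1
--
--     return text
-- ===== SOURCE B (Python) =====
-- def remove_citations(text):
--     out = []
--     i = 0
--     n = len(text)
--     while i < n:
--         if text[i] == '[':
--             i += 3
--         else:
--             out.append(text[i])
--             i += 1
--     return ''.join(out)
-- ===== Notes on version B (the rewrite author's own statement) =====
-- stated objective: alternative
-- what changed: Replaces A's rescanning loop that rebuilds the string by slicing (text[0:char] + text[char+3:]) at every '[' with a single forward pass that skips 3 positions at '[' and appends kept characters to an output list, joined once at the end.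
import Mathlib
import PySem

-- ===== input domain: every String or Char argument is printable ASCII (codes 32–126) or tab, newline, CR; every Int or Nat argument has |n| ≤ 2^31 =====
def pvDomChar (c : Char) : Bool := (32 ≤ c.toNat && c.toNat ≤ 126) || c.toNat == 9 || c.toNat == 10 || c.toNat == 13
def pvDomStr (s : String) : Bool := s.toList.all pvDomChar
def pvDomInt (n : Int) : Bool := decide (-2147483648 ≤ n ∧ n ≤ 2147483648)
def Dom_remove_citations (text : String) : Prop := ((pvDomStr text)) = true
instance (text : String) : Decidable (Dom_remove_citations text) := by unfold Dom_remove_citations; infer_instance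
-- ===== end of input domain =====

-- B replaces A's slice-and-rescan loop with a single forward pass that copies kept
-- characters into an accumulator and joins once (objective: alternative).

-- ===== PORT A =====
-- A's while loop: index `char` over the (mutating) string; on '[' splice out three
-- characters (text[0:char] + text[char+3:], nonnegative in-range slices = take/drop,
-- exact here) and keep the index, otherwise advance. Strings are handled as their
-- character lists.
def pvALoop (text : List Char) (char : Nat) : List Char :=
  if h : char < text.length then
    if text[char] = '[' then
      pvALoop (text.take char ++ text.drop (char + 3)) char
    else
      pvALoop text (char + 1)
  else
    text
termination_by text.length - char
decreasing_by
  · simp only [List.length_append, List.length_take, List.length_drop]; omega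
  · omega

def remove_citations (text : String) : String := String.mk (pvALoop text.toList 0)

-- ===== PORT B =====
-- Source B: while i < n: skip 3 on '[', else append text[i] to out; return ''.join(out).
def pvBLoop (text : List Char) (i : Nat) (out : List Char) : List Char :=
  if h : i < text.length then
    if text[i] = '[' then
      pvBLoop text (i + 3) out
    else
      pvBLoop text (i + 1) (out ++ [text[i]])
  else
    out
termination_by text.length - i

def remove_citations_alt (text : String) : String := String.mk (pvBLoop text.toList 0 [])

-- ===== PRECONDITION & SPEC =====
def Spec_remove_citations (text : String) (out : String) : Prop := out = remove_citations_alt text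
instance (text : String) (out : String) : Decidable (Spec_remove_citations text out) := by unfold Spec_remove_citations; infer_instance

-- ===== CLAIM (what is proved, stated in full; the proofs are below) =====
def Claim_equal_remove_citations : Prop := ∀ (text : String), Dom_remove_citations text → Spec_remove_citations text (remove_citations text)

-- ===== LEMMAS AND PROOFS =====

-- canonical result: strip each '[' together with the two characters after it
def pvStrip : List Char → List Char
  | [] => []
  | c :: rest => if c = '[' then pvStrip (rest.drop 2) else c :: pvStrip rest
termination_by l => l.length
decreasing_by
  · simp only [List.length_cons, List.length_drop]; omega
  · simp

theorem pvALoop_eq (text : List Char) (char : Nat) :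
    pvALoop text char = text.take char ++ pvStrip (text.drop char) := by
  fun_induction pvALoop text char with
  | case1 text char h hbr ih =>
    rw [ih, List.take_append_of_le_length (by simp; omega),
        List.take_take, Nat.min_self,
        List.drop_append_of_le_length (by simp; omega)]
    have hd : (text.take char).drop char = [] := by simp
    rw [hd, List.nil_append]
    have : text.drop char = text[char] :: text.drop (char + 1) :=
      List.drop_eq_getElem_cons h
    rw [this, pvStrip, if_pos hbr, List.drop_drop]
  | case2 text char h hbr ih =>
    rw [ih]
    have : text.drop char = text[char] :: text.drop (char + 1) :=
      List.drop_eq_getElem_cons h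
    rw [this, pvStrip, if_neg hbr, List.take_add_one, List.getElem?_eq_getElem h]
    simp only [Option.toList_some, List.append_assoc, List.singleton_append]
  | case3 text char h =>
    have hlen : text.length ≤ char := by omega
    rw [List.take_of_length_le hlen, List.drop_of_length_le hlen, pvStrip,
        List.append_nil]

theorem pvBLoop_eq (text : List Char) (i : Nat) (out : List Char) :
    pvBLoop text i out = out ++ pvStrip (text.drop i) := by
  fun_induction pvBLoop text i out with
  | case1 i out h hbr ih =>
    rw [ih]
    have : text.drop i = text[i] :: text.drop (i + 1) :=
      List.drop_eq_getElem_cons h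
    rw [this, pvStrip, if_pos hbr, List.drop_drop]
  | case2 i out h hbr ih =>
    rw [ih]
    have : text.drop i = text[i] :: text.drop (i + 1) :=
      List.drop_eq_getElem_cons h
    rw [this, pvStrip, if_neg hbr, List.append_assoc]
    simp
  | case3 i out h =>
    have hlen : text.length ≤ i := by omega
    rw [List.drop_of_length_le hlen, pvStrip, List.append_nil]

-- ===== VERDICT (by name: the statement is the Claim_ definition above) =====
theorem remove_citations_spec : Claim_equal_remove_citations := by
  intro text _
  show remove_citations text = remove_citations_alt text
  unfold remove_citations remove_citations_alt
  rw [pvALoop_eq, pvBLoop_eq]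
  simp
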